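-- pv_equiv track=rewrite | github.com/rlatmd0829/algorithm | 알고리즘풀이시즌2/라인/2.py | solution
-- ===== SOURCE A (Python) =====
-- from collections import defaultdict
-- from collections import Counter
--
-- def solution(research, n, k):
--     answer = []
--     eng = []
--     result = defaultdict(list)
--     for i in research:
--         set_i = set(i)
--         for j in set_i:
--             if j not in eng:
--                 eng.append(j)
--     for i in eng:
--         for j in research:
--             result[i].append(j.count(i))
--
--     for i in result.items():
--         for j in range(len(i[1])):
--             demo = 0
--             for w in range(0, len(i[1])-n+1):
--
--                 count = 0
--                 for m in range(w, w+n):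
--                     if i[1][m] >= k:
--                         count += 1
--
--                 if count == n and sum(i[1][w:w+n]) >= 2*n*k:
--                     answer.append(i[0])
--
--             counter = Counter(answer)
--
--     if counter:
--         ans = counter.most_common()
--         ans.sort(key = lambda x : (-x[1],x[0]))
--         answer = ans[0][0]
--         return answer
--     else:
--         return "None"
-- ===== SOURCE B (Python) =====
-- def _window_hits(counts, n, k):
--     """Number of windows of `counts` of size n whose entries are all >= k and whose
--     sum is >= 2*n*k, maintained incrementally over one left-to-right pass."""
--     L = len(counts)
--     hits = 0
--     if 0 <= n <= L:
--         good = sum(1 for v in counts[:n] if v >= k)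
--         tot = sum(counts[:n])
--         thr = 2 * n * k
--         if good == n and tot >= thr:
--             hits += 1
--         for w in range(1, L - n + 1):
--             good += (counts[w + n - 1] >= k) - (counts[w - 1] >= k)
--             tot += counts[w + n - 1] - counts[w - 1]
--             if good == n and tot >= thr:
--                 hits += 1
--     return hits
--
--
-- def solution(research, n, k):
--     best_c = None
--     best_h = 0
--     for c in sorted({c for s in research for c in s}):
--         h = _window_hits([s.count(c) for s in research], n, k)
--         if h > best_h:
--             best_h = h
--             best_c = c
--     return best_c if best_c is not None else "None"
-- ===== Notes on version B (the rewrite author's own statement) =====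
-- stated objective: faster
-- what changed: B replaces A's per-character re-scan of every window (and A's redundant outer loop that repeats the whole window pass len(research) times per character, feeding a Counter plus two sorts) with one incremental sliding window per character and a single running (best-count, smallest-char) accumulator over the sorted character set.
import Mathlib
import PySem

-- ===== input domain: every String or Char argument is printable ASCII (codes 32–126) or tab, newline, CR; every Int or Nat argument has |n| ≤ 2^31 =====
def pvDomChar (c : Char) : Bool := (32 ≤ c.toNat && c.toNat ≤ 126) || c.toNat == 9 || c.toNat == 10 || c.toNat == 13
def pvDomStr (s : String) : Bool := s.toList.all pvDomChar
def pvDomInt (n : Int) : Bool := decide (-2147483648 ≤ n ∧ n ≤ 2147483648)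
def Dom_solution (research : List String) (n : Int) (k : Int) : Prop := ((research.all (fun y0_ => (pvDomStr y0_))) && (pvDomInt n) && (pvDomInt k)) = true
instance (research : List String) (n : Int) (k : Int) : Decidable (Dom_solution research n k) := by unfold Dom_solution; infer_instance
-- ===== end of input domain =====

-- B replaces A's Counter-over-repeated-appends with a per-character incremental sliding
-- window and a running best; objective: faster (A rescans every window element and repeats
-- the whole window pass len(research) times per character).

-- ===== PORT A =====
-- Literal transliteration of A.  Python's iteration over set(i) is hash-ordered; it is
-- ported in first-insertion order (the returned value does not depend on this order, as
-- the proofs below establish: the final double sort selects an order-independent element).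
def solution (research : List String) (n : Int) (k : Int) : String :=
  let eng : List String :=
    research.foldl (fun eng i =>
      (PySem.Set.ofList (i.toList.map (fun c => String.ofList [c]))).foldl
        (fun eng j => if j ∈ eng then eng else eng ++ [j]) eng) []
  let result : PySem.Dict String (List Int) :=
    eng.foldl (fun d i =>
      research.foldl (fun d j => d.modify i [] (fun l => l ++ [(PySem.Str.count j i : Int)])) d)
      PySem.Dict.empty
  let st : List String × Option (PySem.Dict String Int) :=
    result.items.foldl (fun st i =>
      (PySem.List.pyRange 0 (i.2.length : Int) 1).foldl (fun st _j =>
        let answer :=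
          (PySem.List.pyRange 0 ((i.2.length : Int) - n + 1) 1).foldl (fun answer w =>
            let count : Int :=
              (PySem.List.pyRange w (w + n) 1).foldl (fun count m =>
                if k ≤ PySem.List.pyGetD i.2 m 0 then count + 1 else count) 0
            if count = n ∧ 2 * n * k ≤ (PySem.List.slice i.2 (some w) (some (w + n))).sum
            then answer ++ [i.1] else answer) st.1
        (answer, some (PySem.Dict.counter answer))) st)
      ([], none)
  match st.2 with
  | none => "None"  -- Python raises NameError here (counter unbound); excluded by Pre_solution
  | some counter =>
    if counter.items ≠ [] then
      let ans1 := PySem.List.sorted counter.items (fun x => x.2) true      -- counter.most_common()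
      let ans2 := PySem.List.sorted2 ans1 (fun x => -x.2) (fun x => x.1) false
      match ans2 with
      | p :: _ => p.1
      | [] => "None"  -- unreachable: ans2 is a permutation of the nonempty items
    else "None"

-- ===== PORT B =====
def solutionAltWindowHits (counts : List Int) (n k : Int) : Int :=
  let L : Int := (counts.length : Int)
  if 0 ≤ n ∧ n ≤ L then
    let head := PySem.List.slice counts (some 0) (some n)
    let good0 : Int := head.foldl (fun g v => if k ≤ v then g + 1 else g) 0
    let tot0 : Int := head.sum
    let thr := 2 * n * k
    let init : Int := if good0 = n ∧ thr ≤ tot0 then 1 else 0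
    ((PySem.List.pyRange 1 (L - n + 1) 1).foldl (fun st w =>
      let g := st.2.1 + (if k ≤ PySem.List.pyGetD counts (w + n - 1) 0 then 1 else 0)
                      - (if k ≤ PySem.List.pyGetD counts (w - 1) 0 then 1 else 0)
      let t := st.2.2 + PySem.List.pyGetD counts (w + n - 1) 0
                      - PySem.List.pyGetD counts (w - 1) 0
      (if g = n ∧ thr ≤ t then st.1 + 1 else st.1, g, t))
      (init, good0, tot0)).1
  else 0

def solution_alt (research : List String) (n : Int) (k : Int) : String :=
  let chars : List String :=
    PySem.List.sorted
      (PySem.Set.ofList (research.flatMap (fun s => s.toList.map (fun c => String.ofList [c]))))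
      (fun x => x) false
  let best : Option String × Int :=
    chars.foldl (fun best c =>
      let h := solutionAltWindowHits (research.map (fun s => (PySem.Str.count s c : Int))) n k
      if best.2 < h then (some c, h) else best) (none, 0)
  match best.1 with
  | some c => c
  | none => "None"

-- ===== PRECONDITION & SPEC =====
-- Pre_ excludes exactly the inputs on which A raises NameError (all strings empty, so the
-- items loop never runs and `counter` is never bound); A returns no value there.
def Pre_solution (research : List String) (n : Int) (k : Int) : Prop := ∃ s ∈ research, s ≠ ""
instance (research : List String) (n : Int) (k : Int) : Decidable (Pre_solution research n k) := by unfold Pre_solution; infer_instance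
def pvWitness_solution : List String × Int × Int := (["ab", "b"], 1, 1)

def Spec_solution (research : List String) (n : Int) (k : Int) (out : String) : Prop := out = solution_alt research n k
instance (research : List String) (n : Int) (k : Int) (out : String) : Decidable (Spec_solution research n k out) := by unfold Spec_solution; infer_instance

-- ===== CLAIM (what is proved, stated in full; the proofs are below) =====
def Claim_equal_solution : Prop := ∀ (research : List String) (n : Int) (k : Int), Dom_solution research n k → Pre_solution research n k → Spec_solution research n k (solution research n k)
-- ===== LEMMAS AND PROOFS =====

-- The character alphabet of `research`, as one-character strings (with multiplicity).
def pvChars (research : List String) : List String :=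
  research.flatMap (fun s => s.toList.map (fun c => String.ofList [c]))

-- Per-character occurrence counts, one per string of `research` (Python's j.count(i)).
def pvCnts (research : List String) (c : String) : List Int :=
  research.map (fun j => (PySem.Str.count j c : Int))

-- The window condition of A (all n entries >= k, window sum >= 2nk), over the window
-- of size n starting at w.
abbrev pvCond (l : List Int) (n k : Int) (w : Nat) : Prop :=
  ((((l.drop w).take n.toNat).countP (fun v => decide (k ≤ v)) : Int) = n ∧
    2 * n * k ≤ ((l.drop w).take n.toNat).sum)

-- Number of windows of l satisfying the condition (ranging over Python's range(0, len-n+1)).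
def pvHitsL (l : List Int) (n k : Int) : Nat :=
  (List.range (((l.length : Int) - n + 1).toNat)).countP (fun w => decide (pvCond l n k w))

def pvHits (research : List String) (n k : Int) (c : String) : Nat :=
  pvHitsL (pvCnts research c) n k

-- The value both programs compute: "None" if no character has a qualifying window,
-- otherwise the character with the most qualifying windows, ties broken by smallest.
def pvIsPick (research : List String) (n k : Int) (out : String) : Prop :=
  ((∀ c ∈ pvChars research, pvHits research n k c = 0) ∧ out = "None") ∨
  (out ∈ pvChars research ∧ 0 < pvHits research n k out ∧
    ∀ c ∈ pvChars research, pvHits research n k c ≤ pvHits research n k out ∧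
      (pvHits research n k c = pvHits research n k out → out ≤ c))

theorem pvIsPick_unique (research : List String) (n k : Int) (o1 o2 : String)
    (h1 : pvIsPick research n k o1) (h2 : pvIsPick research n k o2) : o1 = o2 := by
  rcases h1 with ⟨hz1, rfl⟩ | ⟨hm1, hp1, hmax1⟩
  · rcases h2 with ⟨_, rfl⟩ | ⟨hm2, hp2, _⟩
    · rfl
    · exact absurd (hz1 _ hm2) (by omega)
  · rcases h2 with ⟨hz2, rfl⟩ | ⟨hm2, hp2, hmax2⟩
    · exact absurd (hz2 _ hm1) (by omega)
    · have h12 := hmax1 _ hm2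
      have h21 := hmax2 _ hm1
      have heq : pvHits research n k o2 = pvHits research n k o1 := le_antisymm h12.1 h21.1
      exact le_antisymm (h12.2 heq) (h21.2 heq.symm)

theorem pvRange_nil (a b : Int) (h : b ≤ a) : PySem.List.pyRange a b 1 = [] := by
  simp [PySem.List.pyRange]; omega


-- B's incremental sliding-window loop, tracked against the recomputed window quantities:
-- after processing w = 1..m the state is (number of qualifying windows among 0..m,
-- count of entries >= k in window m, sum of window m).
theorem pvSlideAux (l : List Int) (n k : Int) (hn : 0 ≤ n) :
    ∀ (m : Nat), m + n.toNat ≤ l.length →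
    (PySem.List.pyRange 1 (1 + (m : Int)) 1).foldl
      (fun st w =>
        (if st.2.1 + (if k ≤ PySem.List.pyGetD l (w + n - 1) 0 then (1:Int) else 0)
              - (if k ≤ PySem.List.pyGetD l (w - 1) 0 then (1:Int) else 0) = n ∧
            2 * n * k ≤ st.2.2 + PySem.List.pyGetD l (w + n - 1) 0 - PySem.List.pyGetD l (w - 1) 0
         then st.1 + 1 else st.1,
         st.2.1 + (if k ≤ PySem.List.pyGetD l (w + n - 1) 0 then (1:Int) else 0)
              - (if k ≤ PySem.List.pyGetD l (w - 1) 0 then (1:Int) else 0),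
         st.2.2 + PySem.List.pyGetD l (w + n - 1) 0 - PySem.List.pyGetD l (w - 1) 0))
      ((if pvCond l n k 0 then (1:Int) else 0),
       (((l.drop 0).take n.toNat).countP (fun v => decide (k ≤ v)) : Int), ((l.drop 0).take n.toNat).sum)
    = (((List.range (m+1)).countP (fun w => decide (pvCond l n k w)) : Int),
       (((l.drop m).take n.toNat).countP (fun v => decide (k ≤ v)) : Int), ((l.drop m).take n.toNat).sum) := by
  intro m
  induction m with
  | zero =>
    intro _
    rw [show (1 + ((0:Nat):Int)) = 1 from by omega]
    rw [show PySem.List.pyRange 1 1 1 = [] from pvRange_nil 1 1 le_rfl]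
    simp only [List.foldl_nil, List.drop_zero, Nat.zero_add, List.range_one]
    by_cases hc : pvCond l n k 0
    · simp only [pvCond, List.drop_zero] at hc
      simp [hc]
    · simp only [pvCond, List.drop_zero] at hc
      simp [hc]
      intro h
      exact lt_of_not_ge (fun hge => hc ⟨h, hge⟩)
  | succ m ih =>
    intro hb
    have hb' : m + n.toNat ≤ l.length := by omega
    have : (1 : Int) + ((m+1 : Nat) : Int) = (1 + (m : Int)) + 1 := by push_cast; ring
    rw [this, PySem.List.pyRange_one_succ_right (by omega), List.foldl_append, ih hb']
    simp only [List.foldl_cons, List.foldl_nil]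
    have e1 : (1 + (m : Int)) + n - 1 = ((m + n.toNat : Nat) : Int) := by push_cast; omega
    have e2 : (1 + (m : Int)) - 1 = ((m : Nat) : Int) := by ring
    have g1 : PySem.List.pyGetD l ((1 + (m : Int)) + n - 1) 0 = l[m + n.toNat]'(by omega) := by
      rw [e1, PySem.List.pyGetD_eq_getElem l 0 (by omega) (by push_cast; omega)]
      simp only [Int.toNat_natCast]
    have g2 : PySem.List.pyGetD l ((1 + (m : Int)) - 1) 0 = l[m]'(by omega) := by
      rw [e2, PySem.List.pyGetD_eq_getElem l 0 (by omega) (by omega)]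
      simp only [Int.toNat_natCast]
    rw [g1, g2]
    have hkey : l[m]'(by omega) :: (l.drop (m+1)).take n.toNat
        = (l.drop m).take n.toNat ++ [l[m + n.toNat]'(by omega)] := by
      have h1 : (List.drop m l).take (n.toNat + 1) = (List.drop m l).take n.toNat ++ [l[m + n.toNat]'(by omega)] := by
        rw [List.take_add_one, List.getElem?_drop, List.getElem?_eq_getElem (by omega)]; rfl
      have h2 : (List.drop m l).take (n.toNat + 1) = l[m]'(by omega) :: (List.drop (m + 1) l).take n.toNat := by
        rw [List.drop_eq_getElem_cons (by omega : m < l.length), List.take_succ_cons]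
      rw [← h1, ← h2]
    have hG : ((((l.drop (m+1)).take n.toNat).countP (fun v => decide (k ≤ v)) : Int)) =
        (((l.drop m).take n.toNat).countP (fun v => decide (k ≤ v)) : Int)
          + (if k ≤ l[m + n.toNat]'(by omega) then (1:Int) else 0) - (if k ≤ l[m]'(by omega) then (1:Int) else 0) := by
      have := congrArg (List.countP (fun v => decide (k ≤ v))) hkey
      rw [List.countP_cons, List.countP_append, List.countP_singleton] at this
      by_cases h1 : k ≤ l[m]'(by omega) <;> by_cases h2 : k ≤ l[m + n.toNat]'(by omega) <;>
        simp [h1, h2] at this ⊢ <;> omega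
    have hT : ((l.drop (m+1)).take n.toNat).sum =
        ((l.drop m).take n.toNat).sum + l[m + n.toNat]'(by omega) - l[m]'(by omega) := by
      have := congrArg List.sum hkey
      rw [List.sum_cons, List.sum_append, List.sum_singleton] at this
      omega
    have hC : (((List.range (m+1+1)).countP (fun w => decide (pvCond l n k w)) : Int)) =
        ((List.range (m+1)).countP (fun w => decide (pvCond l n k w)) : Int)
          + (if pvCond l n k (m+1) then (1:Int) else 0) := by
      rw [List.range_succ, List.countP_append, List.countP_singleton]
      by_cases h : pvCond l n k (m+1) <;> simp [h]
    rw [hC, ← hG, ← hT]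
    by_cases hc : pvCond l n k (m+1)
    · simp only [if_pos hc]
    · simp only [if_neg hc, add_zero]

-- B's whole per-character block computes the number of qualifying windows.
theorem pvSlide (l : List Int) (n k L : Int) (hL : L = (l.length : Int)) :
    (if 0 ≤ n ∧ n ≤ L then
      ((PySem.List.pyRange 1 (L - n + 1) 1).foldl
        (fun st w =>
          (if st.2.1 + (if k ≤ PySem.List.pyGetD l (w + n - 1) 0 then (1:Int) else 0)
                - (if k ≤ PySem.List.pyGetD l (w - 1) 0 then (1:Int) else 0) = n ∧
              2 * n * k ≤ st.2.2 + PySem.List.pyGetD l (w + n - 1) 0 - PySem.List.pyGetD l (w - 1) 0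
           then st.1 + 1 else st.1,
           st.2.1 + (if k ≤ PySem.List.pyGetD l (w + n - 1) 0 then (1:Int) else 0)
                - (if k ≤ PySem.List.pyGetD l (w - 1) 0 then (1:Int) else 0),
           st.2.2 + PySem.List.pyGetD l (w + n - 1) 0 - PySem.List.pyGetD l (w - 1) 0))
        ((if (PySem.List.slice l (some 0) (some n)).foldl (fun g v => if k ≤ v then g + 1 else g) 0 = n ∧
              2 * n * k ≤ (PySem.List.slice l (some 0) (some n)).sum then (1:Int) else 0),
         (PySem.List.slice l (some 0) (some n)).foldl (fun g v => if k ≤ v then g + 1 else g) 0,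
         (PySem.List.slice l (some 0) (some n)).sum)).1
     else 0) = (pvHitsL l n k : Int) := by
  by_cases hn : 0 ≤ n ∧ n ≤ L
  · obtain ⟨hn0, hnL⟩ := hn
    rw [if_pos ⟨hn0, hnL⟩]
    have hsl : PySem.List.slice l (some 0) (some n) = (l.drop 0).take n.toNat := by
      rw [PySem.List.slice_toNat l le_rfl hn0]
      norm_num
    have hg : (PySem.List.slice l (some 0) (some n)).foldl (fun g v => if k ≤ v then g + 1 else g) 0
        = (((l.drop 0).take n.toNat).countP (fun v => decide (k ≤ v)) : Int) := by
      rw [hsl, PySem.List.foldl_ite_add_one (p := fun v => k ≤ v), zero_add]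
    rw [hg, hsl]
    have harg : L - n + 1 = 1 + ((l.length - n.toNat : Nat) : Int) := by omega
    rw [harg, pvSlideAux l n k hn0 (l.length - n.toNat) (by omega)]
    unfold pvHitsL
    have : ((l.length : Int) - n + 1).toNat = l.length - n.toNat + 1 := by omega
    rw [this]
  · rw [if_neg hn]
    rcases not_and_or.mp hn with h | h
    · have : pvHitsL l n k = 0 := by
        unfold pvHitsL
        rw [List.countP_eq_zero]
        intro w _
        simp only [decide_eq_true_eq, pvCond, not_and]
        intro hcnt
        exfalso
        have := Int.natCast_nonneg (((l.drop w).take n.toNat).countP (fun v => decide (k ≤ v)))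
        omega
      rw [this]; rfl
    · have : pvHitsL l n k = 0 := by
        unfold pvHitsL
        have : ((l.length : Int) - n + 1).toNat = 0 := by omega
        rw [this]
        rfl
      rw [this]; rfl

-- the running-best loop over a strictly increasing list selects the first maximum,
-- i.e. the smallest character among those with the most qualifying windows
theorem pvBestFold (H : String → Nat) (C : List String) (hC : C.Pairwise (· < ·)) :
    (C.foldl (fun best c => if best.2 < (H c : Int) then (some c, (H c : Int)) else best)
      ((none : Option String), (0:Int)) = (none, 0) ∧ ∀ c ∈ C, H c = 0) ∨
    (∃ c ∈ C, C.foldl (fun best c => if best.2 < (H c : Int) then (some c, (H c : Int)) else best)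
        ((none : Option String), (0:Int)) = (some c, (H c : Int)) ∧ 0 < H c ∧
      ∀ c' ∈ C, H c' ≤ H c ∧ (H c' = H c → c ≤ c')) := by
  induction C using List.reverseRecOn with
  | nil => left; exact ⟨rfl, by simp⟩
  | append_singleton C c ih =>
    rw [List.pairwise_append] at hC
    obtain ⟨hCp, -, hlt⟩ := hC
    have hltc : ∀ x ∈ C, x < c := fun x hx => hlt x hx c (List.mem_singleton_self c)
    rw [List.foldl_append, List.foldl_cons, List.foldl_nil]
    rcases ih hCp with ⟨hb, hz⟩ | ⟨c0, hc0C, hb, hpos, hmax⟩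
    · rw [hb]
      by_cases h : 0 < H c
      · right
        refine ⟨c, by simp, by simp [h], h, ?_⟩
        intro c' hc'
        rcases List.mem_append.mp hc' with hc' | hc'
        · have h0 := hz c' hc'
          exact ⟨by omega, fun he => absurd h (by omega)⟩
        · rw [List.mem_singleton.mp hc']
          exact ⟨le_rfl, fun _ => le_rfl⟩
      · left
        refine ⟨by simp [h], ?_⟩
        intro c' hc'
        rcases List.mem_append.mp hc' with hc' | hc'
        · exact hz c' hc'
        · rw [List.mem_singleton.mp hc']; omega
    · rw [hb]
      by_cases h : H c0 < H c
      · right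
        refine ⟨c, by simp, by simp [h], by omega, ?_⟩
        intro c' hc'
        rcases List.mem_append.mp hc' with hc' | hc'
        · have := (hmax c' hc').1
          exact ⟨by omega, fun he => absurd he (by omega)⟩
        · rw [List.mem_singleton.mp hc']
          exact ⟨le_rfl, fun _ => le_rfl⟩
      · right
        refine ⟨c0, List.mem_append.mpr (Or.inl hc0C), by simp [h], hpos, ?_⟩
        intro c' hc'
        rcases List.mem_append.mp hc' with hc' | hc'
        · exact hmax c' hc'
        · rw [List.mem_singleton.mp hc']
          exact ⟨by omega, fun _ => le_of_lt (hltc c0 hc0C)⟩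

theorem solution_alt_isPick (research : List String) (n k : Int) :
    pvIsPick research n k (solution_alt research n k) := by
  unfold solution_alt
  simp only []
  have hone : ∀ (c : String),
      solutionAltWindowHits (research.map (fun s => (PySem.Str.count s c : Int))) n k
        = (pvHits research n k c : Int) := by
    intro c
    unfold solutionAltWindowHits
    simp only []
    exact pvSlide (research.map (fun s => (PySem.Str.count s c : Int))) n k _ rfl
  have hfold := PySem.List.foldl_congr_mem
    (l := PySem.List.sorted
      (PySem.Set.ofList (research.flatMap (fun s => s.toList.map (fun c => String.ofList [c]))))
      (fun x => x) false)
    (init := ((none : Option String), (0:Int)))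
    (f := fun (best : Option String × Int) c =>
      if best.2 < solutionAltWindowHits (research.map (fun s => (PySem.Str.count s c : Int))) n k
      then (some c, solutionAltWindowHits (research.map (fun s => (PySem.Str.count s c : Int))) n k)
      else best)
    (g := fun (best : Option String × Int) c => if best.2 < (pvHits research n k c : Int)
      then (some c, (pvHits research n k c : Int)) else best)
    (fun best c _ => by simp only [hone c])
  rw [hfold]
  have hmem : ∀ x, x ∈ PySem.List.sorted
      (PySem.Set.ofList (research.flatMap (fun s => s.toList.map (fun c => String.ofList [c]))))
      (fun x => x) false ↔ x ∈ pvChars research := by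
    intro x
    rw [PySem.List.mem_sorted, PySem.Set.mem_ofList]
    rfl
  rcases pvBestFold (pvHits research n k)
      (PySem.List.sorted
        (PySem.Set.ofList (research.flatMap (fun s => s.toList.map (fun c => String.ofList [c]))))
        (fun x => x) false)
      (PySem.List.sorted_ofList_pairwise_lt _) with ⟨hb, hz⟩ | ⟨c, hcC, hb, hpos, hmax⟩
  · rw [hb]
    left
    exact ⟨fun c hc => hz c ((hmem c).mpr hc), rfl⟩
  · rw [hb]
    right
    exact ⟨(hmem c).mp hcC, hpos, fun c' hc' => hmax c' ((hmem c').mpr hc')⟩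


-- ---- A side ----

-- A's eng loop is set-union accumulation: nodup, members = the characters of research
theorem pvEng_aux (research : List String) :
    ∀ (e : List String), e.Nodup →
      (research.foldl (fun eng i =>
        (PySem.Set.ofList (i.toList.map (fun c => String.ofList [c]))).foldl
          (fun eng j => if j ∈ eng then eng else eng ++ [j]) eng) e).Nodup ∧
      (∀ x, x ∈ research.foldl (fun eng i =>
        (PySem.Set.ofList (i.toList.map (fun c => String.ofList [c]))).foldl
          (fun eng j => if j ∈ eng then eng else eng ++ [j]) eng) e ↔
          x ∈ e ∨ x ∈ pvChars research) := by
  induction research with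
  | nil => intro e he; simp [pvChars, he]
  | cons s research ih =>
    intro e he
    rw [List.foldl_cons]
    have hinner : (PySem.Set.ofList (s.toList.map (fun c => String.ofList [c]))).foldl
        (fun eng j => if j ∈ eng then eng else eng ++ [j]) e
        = PySem.Set.update e (PySem.Set.ofList (s.toList.map (fun c => String.ofList [c]))) := by
      rw [PySem.List.foldl_congr_mem _ _ (fun eng j => PySem.Set.add eng j) _
        (fun eng j hj => (PySem.Set.add_eq_ite eng j).symm)]
      rfl
    rw [hinner]
    have hnd : (PySem.Set.update e (PySem.Set.ofList (s.toList.map (fun c => String.ofList [c])))).Nodup :=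
      PySem.Set.nodup_update _ _ he
    obtain ⟨h1, h2⟩ := ih _ hnd
    refine ⟨h1, fun x => ?_⟩
    rw [h2 x, PySem.Set.mem_update, PySem.Set.mem_ofList]
    unfold pvChars
    simp [List.mem_flatMap, or_assoc]

-- the inner dict loop at key i: appends the counts list at i, leaves other keys alone
theorem pvInner_getD (research : List String) (i : String) (d : PySem.Dict String (List Int)) (c : String) :
    (research.foldl (fun d j => d.modify i [] (fun l => l ++ [(PySem.Str.count j i : Int)])) d).getD c []
      = d.getD c [] ++ (if i = c then pvCnts research i else []) := by
  have hm : research.foldl (fun d j => d.modify i [] (fun l => l ++ [(PySem.Str.count j i : Int)])) d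
      = (research.map (fun j => (i, (PySem.Str.count j i : Int)))).foldl
          (fun d p => d.modify p.1 [] (fun l => l ++ [p.2])) d := by
    rw [List.foldl_map]
  rw [hm, PySem.Dict.getD_foldl_modify_append]
  congr 1
  by_cases hic : i = c
  · subst hic
    rw [List.filter_map]
    simp only [Function.comp_def, beq_self_eq_true, List.filter_true]
    rw [List.map_map]
    rfl
  · rw [List.filter_map]
    have : (fun p => p.1 == c) ∘ (fun j => (i, (PySem.Str.count j i : Int))) = fun _ => false := by
      funext j
      simp [hic]
    rw [this]
    simp [hic]

theorem pvUpdate_const {l : List String} {s : PySem.Set String} {i : String} :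
    PySem.Set.update s (l.map (fun _ => i)) = if l = [] then s else PySem.Set.add s i := by
  induction l generalizing s with
  | nil => rfl
  | cons j l ih =>
    rw [List.map_cons, PySem.Set.update_cons, ih]
    by_cases hl : l = []
    · simp [hl]
    · rw [if_neg hl, if_neg (by simp)]
      exact PySem.Set.add_of_mem ((PySem.Set.mem_add s i i).mpr (Or.inr rfl))

theorem pvInner_keys (research : List String) (hr : research ≠ []) (i : String)
    (d : PySem.Dict String (List Int)) :
    (research.foldl (fun d j => d.modify i [] (fun l => l ++ [(PySem.Str.count j i : Int)])) d).keys
      = PySem.Set.add d.keys i := by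
  have := PySem.Dict.keys_foldl_modify_key research (fun _ => i) []
    (fun d j => fun l => l ++ [(PySem.Str.count j i : Int)]) d
  rw [this, pvUpdate_const, if_neg hr]

theorem pvOuter_keys (research : List String) (hr : research ≠ []) :
    ∀ (eng : List String) (d : PySem.Dict String (List Int)),
    (eng.foldl (fun d i =>
      research.foldl (fun d j => d.modify i [] (fun l => l ++ [(PySem.Str.count j i : Int)])) d)
      d).keys = PySem.Set.update d.keys eng := by
  intro eng
  induction eng with
  | nil => intro d; rfl
  | cons i eng ih =>
    intro d
    rw [List.foldl_cons, ih, pvInner_keys research hr, PySem.Set.update_cons]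

theorem pvOuter_getD (research : List String) :
    ∀ (eng : List String), eng.Nodup → ∀ (d : PySem.Dict String (List Int)) (c : String),
    (eng.foldl (fun d i =>
      research.foldl (fun d j => d.modify i [] (fun l => l ++ [(PySem.Str.count j i : Int)])) d)
      d).getD c [] = d.getD c [] ++ (if c ∈ eng then pvCnts research c else []) := by
  intro eng
  induction eng with
  | nil => intro _ d c; simp
  | cons i eng ih =>
    intro hnd d c
    rw [List.foldl_cons, ih hnd.of_cons, pvInner_getD]
    by_cases hic : i = c
    · subst hic
      have hni : i ∉ eng := (List.nodup_cons.mp hnd).1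
      simp [hni]
    · by_cases hce : c ∈ eng <;> simp [hic, hce, Ne.symm hic]

-- the whole result dict: items are exactly the per-character count lists, in eng order
theorem pvResult_items (research : List String) (hr : research ≠ []) (eng : List String)
    (hnd : eng.Nodup) :
    (eng.foldl (fun d i =>
      research.foldl (fun d j => d.modify i [] (fun l => l ++ [(PySem.Str.count j i : Int)])) d)
      PySem.Dict.empty).items = eng.map (fun c => (c, pvCnts research c)) := by
  have hkeyseq : (eng.foldl (fun d i =>
      research.foldl (fun d j => d.modify i [] (fun l => l ++ [(PySem.Str.count j i : Int)])) d)
      PySem.Dict.empty).keys = eng := by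
    rw [pvOuter_keys research hr eng PySem.Dict.empty]
    have h0 : (PySem.Dict.empty : PySem.Dict String (List Int)).keys = ([] : List String) := rfl
    rw [h0, PySem.Set.update_nil_left]
    exact PySem.Set.ofList_eq_self_of_nodup _ hnd
  rw [PySem.Dict.items_eq_map_keys _ (by rw [hkeyseq]; exact hnd) [], hkeyseq]
  apply List.map_congr_left
  intro c hc
  rw [pvOuter_getD research eng hnd PySem.Dict.empty c]
  simp [hc, PySem.Dict.getD_empty]

-- range(w, w+n) read through l is the window of size n at w
theorem pvWindowMap (l : List Int) (nn : Nat) :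
    ∀ (w : Int), 0 ≤ w → w + nn ≤ (l.length : Int) →
    (PySem.List.pyRange w (w + (nn : Int)) 1).map (fun m => PySem.List.pyGetD l m 0) =
      (l.drop w.toNat).take nn := by
  induction nn with
  | zero => intro w hw _; simp [pvRange_nil w w le_rfl]
  | succ nn ih =>
    intro w hw hwn
    rw [show ((nn + 1 : Nat) : Int) = (nn : Int) + 1 from by push_cast; ring] at hwn
    have hlt : w < w + ((nn : Int) + 1) := by omega
    rw [show (((nn+1 : Nat)) : Int) = (nn : Int) + 1 from by push_cast; ring,
      PySem.List.pyRange_one_cons hlt, List.map_cons]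
    have := ih (w + 1) (by omega) (by omega)
    rw [show w + ((nn : Int) + 1) = w + 1 + (nn : Int) from by ring, this]
    have hwnat : w.toNat < l.length := by omega
    rw [PySem.List.pyGetD_eq_getElem l 0 hw (by omega),
        List.drop_eq_getElem_cons hwnat, List.take_succ_cons,
        show (w + 1).toNat = w.toNat + 1 from by omega]

-- A's w-loop appends the character once per qualifying window
theorem pvWloop (l : List Int) (n k : Int) (c : String) (ans : List String) :
    (PySem.List.pyRange 0 ((l.length : Int) - n + 1) 1).foldl (fun answer w =>
      if (PySem.List.pyRange w (w + n) 1).foldl (fun count m =>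
            if k ≤ PySem.List.pyGetD l m 0 then count + 1 else count) (0 : Int) = n ∧
          2 * n * k ≤ (PySem.List.slice l (some w) (some (w + n))).sum
      then answer ++ [c] else answer) ans
    = ans ++ List.replicate (pvHitsL l n k) c := by
  rw [PySem.List.foldl_append_ite
    (p := fun w => (PySem.List.pyRange w (w + n) 1).foldl (fun count m =>
        if k ≤ PySem.List.pyGetD l m 0 then count + 1 else count) (0 : Int) = n ∧
      2 * n * k ≤ (PySem.List.slice l (some w) (some (w + n))).sum)
    (f := fun _ => c)]
  congr 1
  rw [List.map_const']
  congr 1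
  rw [← List.countP_eq_length_filter]
  unfold pvHitsL
  by_cases hm : 0 ≤ (l.length : Int) - n + 1
  · rw [show (l.length : Int) - n + 1 = ((((l.length : Int) - n + 1).toNat : Nat) : Int) from by omega,
      PySem.List.pyRange_zero_natCast, List.countP_map]
    apply List.countP_congr
    intro w hw
    rw [List.mem_range] at hw
    simp only [Function.comp_def]
    by_cases hn : 0 ≤ n
    · have hwn : (w : Int) + n ≤ (l.length : Int) := by omega
      have hmap := pvWindowMap l n.toNat (w : Int) (by omega) (by omega)
      rw [show ((w : Int) + (n.toNat : Int)) = (w : Int) + n from by omega] at hmap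
      simp only [Int.toNat_natCast] at hmap
      have hfold : (PySem.List.pyRange (w : Int) ((w : Int) + n) 1).foldl (fun count m =>
          if k ≤ PySem.List.pyGetD l m 0 then count + 1 else count) (0 : Int)
          = ((((l.drop w).take n.toNat).countP (fun v => decide (k ≤ v)) : Int)) := by
        rw [← hmap, ← List.foldl_map (f := fun m => PySem.List.pyGetD l m 0)
          (g := fun count v => if k ≤ v then count + 1 else count)]
        rw [PySem.List.foldl_ite_add_one (p := fun v => k ≤ v), zero_add]
      have hslice : PySem.List.slice l (some (w : Int)) (some ((w : Int) + n)) = (l.drop w).take n.toNat := by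
        rw [PySem.List.slice_toNat l (by omega) (by omega)]
        congr 1
        omega
      rw [hfold, hslice]
    · have hfold : (PySem.List.pyRange (w : Int) ((w : Int) + n) 1).foldl (fun count m =>
          if k ≤ PySem.List.pyGetD l m 0 then count + 1 else count) (0 : Int) = 0 := by
        rw [pvRange_nil _ _ (by omega)]
        rfl
      rw [hfold]
      have h1 : ¬((0 : Int) = n) := by omega
      have h2 : ¬((((l.drop w).take n.toNat).countP (fun v => decide (k ≤ v)) : Int) = n) := by
        have := Int.natCast_nonneg (((l.drop w).take n.toNat).countP (fun v => decide (k ≤ v)))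
        omega
      simp [h1, h2]
  · rw [pvRange_nil _ _ (by omega)]
    rw [show (((l.length : Int) - n + 1).toNat) = 0 from by omega]
    rfl

-- A's inner j-loop repeats the same append len(research) times, rebinding counter each time
theorem pvJloop (rep : List String) :
    ∀ (js : List Int), js ≠ [] → ∀ (a : List String) (co : Option (PySem.Dict String Int)),
    js.foldl (fun st (_j : Int) => (st.1 ++ rep, some (PySem.Dict.counter (st.1 ++ rep)))) (a, co)
    = (a ++ (List.replicate js.length rep).flatten,
       some (PySem.Dict.counter (a ++ (List.replicate js.length rep).flatten))) := by
  intro js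
  induction js with
  | nil => intro h; exact absurd rfl h
  | cons x js ih =>
    intro _ a co
    rw [List.foldl_cons]
    by_cases hjs : js = []
    · subst hjs
      simp
    · rw [ih hjs]
      simp [List.replicate_succ, List.append_assoc]

-- A's items loop: the final answer is the per-character replicated appends, and counter
-- (bound on the last iteration) is the Counter of that final answer
theorem pvThird (n k : Int) (Lnat : Nat) (hL : 1 ≤ Lnat) :
    ∀ (items : List (String × List Int)), (∀ p ∈ items, p.2.length = Lnat) → items ≠ [] →
    ∀ (a : List String) (co : Option (PySem.Dict String Int)),
    items.foldl (fun st i =>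
      (PySem.List.pyRange 0 (i.2.length : Int) 1).foldl (fun st (_j : Int) =>
        ((PySem.List.pyRange 0 ((i.2.length : Int) - n + 1) 1).foldl (fun answer w =>
            if (PySem.List.pyRange w (w + n) 1).foldl (fun count m =>
                  if k ≤ PySem.List.pyGetD i.2 m 0 then count + 1 else count) (0:Int) = n ∧
                2 * n * k ≤ (PySem.List.slice i.2 (some w) (some (w + n))).sum
            then answer ++ [i.1] else answer) st.1,
         some (PySem.Dict.counter ((PySem.List.pyRange 0 ((i.2.length : Int) - n + 1) 1).foldl (fun answer w =>
            if (PySem.List.pyRange w (w + n) 1).foldl (fun count m =>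
                  if k ≤ PySem.List.pyGetD i.2 m 0 then count + 1 else count) (0:Int) = n ∧
                2 * n * k ≤ (PySem.List.slice i.2 (some w) (some (w + n))).sum
            then answer ++ [i.1] else answer) st.1)))) st) (a, co)
    = (a ++ items.flatMap (fun p => List.replicate (Lnat * pvHitsL p.2 n k) p.1),
       some (PySem.Dict.counter (a ++ items.flatMap (fun p => List.replicate (Lnat * pvHitsL p.2 n k) p.1)))) := by
  intro items
  induction items with
  | nil => intro _ h; exact absurd rfl h
  | cons p rest ih =>
    intro hlen _ a co
    rw [List.foldl_cons]
    have hplen : p.2.length = Lnat := hlen p (by simp)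
    have hstep : ∀ (st : List String × Option (PySem.Dict String Int)),
        (PySem.List.pyRange 0 (p.2.length : Int) 1).foldl (fun st (_j : Int) =>
          ((PySem.List.pyRange 0 ((p.2.length : Int) - n + 1) 1).foldl (fun answer w =>
              if (PySem.List.pyRange w (w + n) 1).foldl (fun count m =>
                    if k ≤ PySem.List.pyGetD p.2 m 0 then count + 1 else count) (0:Int) = n ∧
                  2 * n * k ≤ (PySem.List.slice p.2 (some w) (some (w + n))).sum
              then answer ++ [p.1] else answer) st.1,
           some (PySem.Dict.counter ((PySem.List.pyRange 0 ((p.2.length : Int) - n + 1) 1).foldl (fun answer w =>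
              if (PySem.List.pyRange w (w + n) 1).foldl (fun count m =>
                    if k ≤ PySem.List.pyGetD p.2 m 0 then count + 1 else count) (0:Int) = n ∧
                  2 * n * k ≤ (PySem.List.slice p.2 (some w) (some (w + n))).sum
              then answer ++ [p.1] else answer) st.1)))) st
        = (st.1 ++ List.replicate (Lnat * pvHitsL p.2 n k) p.1,
           some (PySem.Dict.counter (st.1 ++ List.replicate (Lnat * pvHitsL p.2 n k) p.1))) := by
      intro st
      rw [PySem.List.foldl_congr_mem _ _
        (fun st (_j : Int) => (st.1 ++ List.replicate (pvHitsL p.2 n k) p.1,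
          some (PySem.Dict.counter (st.1 ++ List.replicate (pvHitsL p.2 n k) p.1)))) _
        (fun st j hj => by rw [pvWloop p.2 n k p.1 st.1])]
      have hjs : PySem.List.pyRange 0 (p.2.length : Int) 1 ≠ [] := by
        rw [PySem.List.pyRange_zero_natCast]
        simp [hplen]
        omega
      rw [pvJloop (List.replicate (pvHitsL p.2 n k) p.1) _ hjs st.1 st.2]
      rw [List.flatten_replicate_replicate]
      rw [PySem.List.pyRange_zero_natCast, List.length_map, List.length_range, hplen]
    rw [hstep (a, co)]
    by_cases hrest : rest = []
    · subst hrest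
      simp
    · rw [ih (fun q hq => hlen q (by simp [hq])) hrest]
      simp [List.append_assoc]

-- set(answer): the characters that got at least one append, in eng order
theorem pvOfList_flat (m : String → Nat) :
    ∀ (E : List String), E.Nodup →
    PySem.Set.ofList (E.flatMap (fun c => List.replicate (m c) c))
      = E.filter (fun c => decide (0 < m c)) := by
  intro E
  induction E with
  | nil => intro _; rfl
  | cons c E ih =>
    intro hnd
    rw [List.flatMap_cons, PySem.Set.ofList_append]
    have hrep : PySem.Set.ofList (List.replicate (m c) c)
        = if 0 < m c then [c] else [] := by
      cases hm : m c with
      | zero => rfl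
      | succ m' =>
        rw [if_pos (by omega)]
        have : ∀ (mm : Nat), PySem.Set.ofList (List.replicate (mm+1) c) = [c] := by
          intro mm
          induction mm with
          | zero => rfl
          | succ mm ihm =>
            rw [List.replicate_succ (n := mm + 1), PySem.Set.ofList_cons, ihm]
            simp [PySem.Set.discard]
        exact this m'
    rw [hrep]
    by_cases hc : 0 < m c
    · rw [if_pos hc, List.filter_cons_of_pos (by simpa using hc)]
      rw [PySem.Set.update_eq_append_filter, ih hnd.of_cons]
      have hni : c ∉ E := (List.nodup_cons.mp hnd).1
      rw [List.filter_filter, List.singleton_append]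
      congr 1
      apply List.filter_congr
      intro x hx
      have hxc : ¬(x = c) := fun he => hni (he ▸ hx)
      simp [PySem.Set.contains, hxc]
    · rw [if_neg hc, List.filter_cons_of_neg (by simpa using hc)]
      rw [PySem.Set.update_nil_left, ih hnd.of_cons]

-- occurrence count of a character in the replicated answer
theorem pvCount_flat (m : String → Nat) (c0 : String) :
    ∀ (E : List String), E.Nodup →
    (E.flatMap (fun c => List.replicate (m c) c)).count c0
      = if c0 ∈ E then m c0 else 0 := by
  intro E
  induction E with
  | nil => intro _; simp
  | cons c E ih =>
    intro hnd
    rw [List.flatMap_cons, List.count_append, ih hnd.of_cons, List.count_replicate]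
    have hni : c ∉ E := (List.nodup_cons.mp hnd).1
    by_cases hc : c0 = c
    · subst hc
      simp [hni]
    · simp [hc, Ne.symm hc]

-- head of an insertion sort is minimal for the insertion relation
theorem pvHeadMin {α : Type} (before : α → α → Bool)
    (hirr : ∀ a, before a a = false)
    (htrans : ∀ a b c, before a b = true → before b c = true → before a c = true) :
    ∀ (xs : List α),
    ∀ p t, xs.foldl (fun acc x => PySem.List.insertBy before x acc) [] = p :: t →
    ∀ q ∈ xs.foldl (fun acc x => PySem.List.insertBy before x acc) [], before q p = false := by
  have hins : ∀ (acc : List α) (x : α),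
      (∀ p t, acc = p :: t → ∀ q ∈ acc, before q p = false) →
      (∀ p t, PySem.List.insertBy before x acc = p :: t →
        ∀ q ∈ PySem.List.insertBy before x acc, before q p = false) := by
    intro acc x hacc
    cases acc with
    | nil =>
      intro p t hp q hq
      simp only [PySem.List.insertBy] at hp hq
      injection hp with h1 h2
      subst h1
      rw [List.mem_singleton] at hq
      subst hq
      exact hirr _
    | cons y ys =>
      by_cases hxy : before x y = true
      · intro p t hp q hq
        rw [show PySem.List.insertBy before x (y :: ys) = x :: y :: ys from by
          simp [PySem.List.insertBy, hxy]] at hp hq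
        injection hp with h1 h2
        subst h1
        rcases List.mem_cons.mp hq with rfl | hq'
        · exact hirr _
        · by_contra hqx
          have hqy := hacc y ys rfl q hq'
          exact absurd (htrans q x y (by simpa using hqx) hxy) (by rw [hqy]; simp)
      · intro p t hp q hq
        rw [show PySem.List.insertBy before x (y :: ys) = y :: PySem.List.insertBy before x ys from by
          simp [PySem.List.insertBy, hxy]] at hp hq
        injection hp with h1 h2
        subst h1
        rcases List.mem_cons.mp hq with rfl | hq'
        · exact hirr _
        · rcases (PySem.List.mem_insertBy before x q ys).mp hq' with rfl | hq''
          · simpa using hxy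
          · exact hacc y ys rfl q (List.mem_cons_of_mem y hq'')
  intro xs
  have main : ∀ (acc : List α), (∀ p t, acc = p :: t → ∀ q ∈ acc, before q p = false) →
      ∀ p t, xs.foldl (fun acc x => PySem.List.insertBy before x acc) acc = p :: t →
      ∀ q ∈ xs.foldl (fun acc x => PySem.List.insertBy before x acc) acc, before q p = false := by
    induction xs with
    | nil => intro acc hacc; exact hacc
    | cons x xs ih =>
      intro acc hacc
      rw [List.foldl_cons]
      exact ih _ (hins acc x hacc)
  exact main [] (by intro p t h; simp at h)

-- most_common + sort(key=(-count, char)): the head of A's double sort is the unique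
-- (max count, then min char) element
theorem pvSorted2Head (xs : List (String × Int)) (p : String × Int) (t : List (String × Int))
    (h : PySem.List.sorted2 xs (fun x => -x.2) (fun x => x.1) false = p :: t) :
    ∀ q ∈ xs, ¬(p.2 < q.2) ∧ (¬(q.2 < p.2) → ¬(q.1 < p.1)) := by
  have hdef : PySem.List.sorted2 xs (fun x : String × Int => -x.2) (fun x => x.1) false
      = xs.foldl (fun acc x => PySem.List.insertBy
          (fun a b => decide (-a.2 < -b.2) || (!decide (-b.2 < -a.2) && decide (a.1 < b.1))) x acc) [] := rfl
  have hirr : ∀ a : String × Int,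
      (decide (-a.2 < -a.2) || (!decide (-a.2 < -a.2) && decide (a.1 < a.1))) = false := by
    intro a; simp
  have htrans : ∀ a b c : String × Int,
      (decide (-a.2 < -b.2) || (!decide (-b.2 < -a.2) && decide (a.1 < b.1))) = true →
      (decide (-b.2 < -c.2) || (!decide (-c.2 < -b.2) && decide (b.1 < c.1))) = true →
      (decide (-a.2 < -c.2) || (!decide (-c.2 < -a.2) && decide (a.1 < c.1))) = true := by
    intro a b c h1 h2
    simp only [Bool.or_eq_true, Bool.and_eq_true, Bool.not_eq_eq_eq_not, Bool.not_true,
      decide_eq_true_eq, decide_eq_false_iff_not] at h1 h2 ⊢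
    rcases h1 with h1 | ⟨h1a, h1b⟩ <;> rcases h2 with h2 | ⟨h2a, h2b⟩
    · left; omega
    · left; omega
    · left; omega
    · right
      exact ⟨by omega, lt_trans h1b h2b⟩
  have hmin := pvHeadMin _ hirr htrans xs p t (hdef ▸ h)
  intro q hq
  have hqmem : q ∈ xs.foldl (fun acc x => PySem.List.insertBy
      (fun a b => decide (-a.2 < -b.2) || (!decide (-b.2 < -a.2) && decide (a.1 < b.1))) x acc) [] := by
    rw [← hdef]
    exact (List.Perm.mem_iff (PySem.List.sorted2_perm xs _ _ false)).mpr hq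
  have := hmin q hqmem
  simp only [Bool.or_eq_false_iff, Bool.and_eq_false_iff, Bool.not_eq_eq_eq_not, Bool.not_false,
    decide_eq_false_iff_not, decide_eq_true_eq] at this
  obtain ⟨ha, hb⟩ := this
  refine ⟨by omega, fun hqp => ?_⟩
  rcases hb with hb | hb
  · exact absurd (by omega) hqp
  · exact hb

theorem solution_isPick (research : List String) (n k : Int)
    (hpre : Pre_solution research n k) :
    pvIsPick research n k (solution research n k) := by
  obtain ⟨s0, hs0r, hs0⟩ := hpre
  have hrne : research ≠ [] := fun h => by subst h; exact absurd hs0r (List.not_mem_nil)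
  have hLpos : 1 ≤ research.length := List.length_pos_of_ne_nil hrne
  have hchar : ∃ x, x ∈ pvChars research := by
    have htoL : s0.toList ≠ [] := by
      intro h
      apply hs0
      have := congrArg String.ofList h
      simpa using this
    obtain ⟨ch, hch⟩ := List.exists_mem_of_ne_nil _ htoL
    refine ⟨String.ofList [ch], ?_⟩
    unfold pvChars
    rw [List.mem_flatMap]
    exact ⟨s0, hs0r, List.mem_map.mpr ⟨ch, hch, rfl⟩⟩
  unfold solution
  simp only []
  obtain ⟨hengnd, hengmem⟩ := pvEng_aux research [] List.nodup_nil
  set eng := research.foldl (fun eng i =>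
      (PySem.Set.ofList (i.toList.map (fun c => String.ofList [c]))).foldl
        (fun eng j => if j ∈ eng then eng else eng ++ [j]) eng) [] with heng
  have hmemE : ∀ x, x ∈ eng ↔ x ∈ pvChars research := by
    intro x
    rw [hengmem x]
    simp
  have hengne : eng ≠ [] := by
    obtain ⟨x, hx⟩ := hchar
    exact List.ne_nil_of_mem ((hmemE x).mpr hx)
  rw [pvResult_items research hrne eng hengnd]
  rw [pvThird n k research.length hLpos (eng.map (fun c => (c, pvCnts research c)))
    (by
      intro p hp
      obtain ⟨c, hc, rfl⟩ := List.mem_map.mp hp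
      simp [pvCnts])
    (by simpa using hengne) [] none]
  simp only [List.nil_append]
  have hFF : (eng.map (fun c => (c, pvCnts research c))).flatMap
      (fun p => List.replicate (research.length * pvHitsL p.2 n k) p.1)
    = eng.flatMap (fun c => List.replicate (research.length * pvHits research n k c) c) := by
    rw [List.flatMap_map]
    rfl
  rw [hFF]
  have hci : (PySem.Dict.counter (eng.flatMap
        (fun c => List.replicate (research.length * pvHits research n k c) c))).items
      = (eng.filter (fun c => decide (0 < research.length * pvHits research n k c))).map
          (fun c => (c, ((research.length * pvHits research n k c : Nat) : Int))) := by
    rw [PySem.Dict.items_counter,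
      pvOfList_flat (fun c => research.length * pvHits research n k c) eng hengnd]
    apply List.map_congr_left
    intro c hc
    have hcE : c ∈ eng := List.mem_of_mem_filter hc
    rw [pvCount_flat (fun c => research.length * pvHits research n k c) c eng hengnd, if_pos hcE]
  by_cases hfe : eng.filter (fun c => decide (0 < research.length * pvHits research n k c)) = []
  · have hie : (PySem.Dict.counter (eng.flatMap
        (fun c => List.replicate (research.length * pvHits research n k c) c))).items = [] := by
      rw [hci, hfe]
      rfl
    simp only [hie, ne_eq, not_true_eq_false, ite_false]
    left
    refine ⟨?_, rfl⟩
    intro c hc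
    have hcE := (hmemE c).mpr hc
    have h0 := List.filter_eq_nil_iff.mp hfe c hcE
    simp only [decide_eq_true_eq, Nat.pos_iff_ne_zero, not_not] at h0
    rcases Nat.mul_eq_zero.mp h0 with h | h
    · omega
    · exact h
  · have hitemsne : (PySem.Dict.counter (eng.flatMap
        (fun c => List.replicate (research.length * pvHits research n k c) c))).items ≠ [] := by
      rw [hci]
      simpa using hfe
    rw [if_pos hitemsne]
    have hne2 : PySem.List.sorted2
        (PySem.List.sorted (PySem.Dict.counter (eng.flatMap
          (fun c => List.replicate (research.length * pvHits research n k c) c))).items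
          (fun x => x.2) true)
        (fun x => -x.2) (fun x => x.1) false ≠ [] := by
      intro hnil
      have hperm := PySem.List.sorted2_perm
        (PySem.List.sorted (PySem.Dict.counter (eng.flatMap
          (fun c => List.replicate (research.length * pvHits research n k c) c))).items
          (fun x => x.2) true)
        (fun x : String × Int => -x.2) (fun x => x.1) false
      rw [hnil] at hperm
      exact hitemsne ((PySem.List.sorted_eq_nil_iff _ _ _).mp (List.nil_perm.mp hperm))
    obtain ⟨p, t, hpt⟩ := List.exists_cons_of_ne_nil hne2
    rw [hpt]
    dsimp only
    have hmemS : ∀ q, q ∈ (PySem.Dict.counter (eng.flatMap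
        (fun c => List.replicate (research.length * pvHits research n k c) c))).items ↔
        q ∈ PySem.List.sorted (PySem.Dict.counter (eng.flatMap
          (fun c => List.replicate (research.length * pvHits research n k c) c))).items
          (fun x => x.2) true :=
      fun q => (PySem.List.mem_sorted _ _ _ q).symm
    have hmin := pvSorted2Head _ p t hpt
    have hminI : ∀ q ∈ (PySem.Dict.counter (eng.flatMap
        (fun c => List.replicate (research.length * pvHits research n k c) c))).items,
        ¬(p.2 < q.2) ∧ (¬(q.2 < p.2) → ¬(q.1 < p.1)) :=
      fun q hq => hmin q ((hmemS q).mp hq)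
    have hpI : p ∈ (PySem.Dict.counter (eng.flatMap
        (fun c => List.replicate (research.length * pvHits research n k c) c))).items := by
      have hp2 : p ∈ PySem.List.sorted2
          (PySem.List.sorted (PySem.Dict.counter (eng.flatMap
            (fun c => List.replicate (research.length * pvHits research n k c) c))).items
            (fun x => x.2) true)
          (fun x => -x.2) (fun x => x.1) false := by
        rw [hpt]
        exact List.mem_cons_self
      have := (List.Perm.mem_iff (PySem.List.sorted2_perm _ _ _ _)).mp hp2
      exact (hmemS p).mpr this
    obtain ⟨c0, hc0f, hpeq⟩ := List.mem_map.mp (hci ▸ hpI)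
    have hc0E : c0 ∈ eng := List.mem_of_mem_filter hc0f
    have hc0pos : 0 < pvHits research n k c0 := by
      have hmf := List.of_mem_filter hc0f
      simp only [decide_eq_true_eq] at hmf
      exact Nat.pos_of_ne_zero (fun h0 => by rw [h0, Nat.mul_zero] at hmf; omega)
    have hp1 : p.1 = c0 := by rw [← hpeq]
    have hp2 : p.2 = ((research.length * pvHits research n k c0 : Nat) : Int) := by rw [← hpeq]
    right
    rw [hp1]
    refine ⟨(hmemE c0).mp hc0E, hc0pos, ?_⟩
    intro c hc
    have hcE := (hmemE c).mpr hc
    by_cases hHc : 0 < pvHits research n k c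
    · have hcf : c ∈ eng.filter (fun c => decide (0 < research.length * pvHits research n k c)) :=
        List.mem_filter.mpr ⟨hcE, by simpa using Nat.mul_pos (by omega) hHc⟩
      have hqI : (c, ((research.length * pvHits research n k c : Nat) : Int)) ∈
          (PySem.Dict.counter (eng.flatMap
            (fun c => List.replicate (research.length * pvHits research n k c) c))).items := by
        rw [hci]
        exact List.mem_map.mpr ⟨c, hcf, rfl⟩
      obtain ⟨hle, htie⟩ := hminI _ hqI
      rw [hp2] at hle
      rw [hp1, hp2] at htie
      dsimp only at hle htie
      constructor
      · have hmle : (research.length * pvHits research n k c : Nat)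
            ≤ (research.length * pvHits research n k c0 : Nat) := by
          by_contra hgt
          rw [Nat.not_le] at hgt
          exact hle (by exact_mod_cast hgt)
        exact Nat.le_of_mul_le_mul_left hmle (by omega)
      · intro heq
        have hmeq : ((research.length * pvHits research n k c : Nat) : Int)
            = ((research.length * pvHits research n k c0 : Nat) : Int) := by
          rw [heq]
        have hnl := htie (by rw [hmeq]; exact lt_irrefl _)
        exact le_of_not_gt hnl
    · have h0 : pvHits research n k c = 0 := by omega
      exact ⟨by omega, fun he => absurd (he ▸ h0).symm (by omega)⟩

-- ===== VERDICT (by name: the statement is the Claim_ definition above) =====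
theorem solution_spec : Claim_equal_solution := by
  intro research n k _ hpre
  unfold Spec_solution
  exact pvIsPick_unique research n k _ _ (solution_isPick research n k hpre)
    (solution_alt_isPick research n k)
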